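-- pv_equiv track=rewrite | github.com/kmsmith137/pirate | pirate_frb/yaml_utils.py | indent_dedispersion_plan_comments
-- ===== SOURCE A (Python) =====
-- def indent_dedispersion_plan_comments(yaml_str):
--     """
--     Hack to indent multiline comments in YAML output from DedispersionPlan::to_yaml().
--
--     yaml-cpp doesn't support indented comments, so we post-process the output to indent
--     multiline comments that start with "# At tree_index=..." by 4 spaces.
--     """
--     lines = yaml_str.split('\n')
--     result = []
--     in_block = False
--
--     for line in lines:
--         if line.startswith('# At tree_index='):
--             # Start of a multiline comment block
--             in_block = True
--             result.append('    ' + line)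
--         elif in_block and line.startswith('#'):
--             # Continuation of the multiline comment block
--             result.append('    ' + line)
--         else:
--             # Not in a comment block, or end of block
--             in_block = False
--             result.append(line)
--
--     return '\n'.join(result)
-- ===== SOURCE B (Python) =====
-- import re
--
-- _BLOCK_RE = re.compile(r'^# At tree_index=.*(?:\n#.*)*', re.MULTILINE)
--
-- def indent_dedispersion_plan_comments(yaml_str):
--     # Whole-string pattern matching instead of a stateful line scan: each comment
--     # block (a "# At tree_index=" line plus the following run of '#' lines) is one
--     # regex match, and the replacement indents every line of the match by 4 spaces.
--     def indent_block(m):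
--         return '\n'.join('    ' + line for line in m.group(0).split('\n'))
--     return _BLOCK_RE.sub(indent_block, yaml_str)
-- ===== Notes on version B (the rewrite author's own statement) =====
-- stated objective: idiomatic
-- what changed: Replaces A's stateful line list + in_block flag scan by a single whole-string regex substitution (re.MULTILINE): each comment block is one match of r'^# At tree_index=.*(?:\n#.*)*' and the replacement function indents every line of the match.
import Mathlib
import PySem

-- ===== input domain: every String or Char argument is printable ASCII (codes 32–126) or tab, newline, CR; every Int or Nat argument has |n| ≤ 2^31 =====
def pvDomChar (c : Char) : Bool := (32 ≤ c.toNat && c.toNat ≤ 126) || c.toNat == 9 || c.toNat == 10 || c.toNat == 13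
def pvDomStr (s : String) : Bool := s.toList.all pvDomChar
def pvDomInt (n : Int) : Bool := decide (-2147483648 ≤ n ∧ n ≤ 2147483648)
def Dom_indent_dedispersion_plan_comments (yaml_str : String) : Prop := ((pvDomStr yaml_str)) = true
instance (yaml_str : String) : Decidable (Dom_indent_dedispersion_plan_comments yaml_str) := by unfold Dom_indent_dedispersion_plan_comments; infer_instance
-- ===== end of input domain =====

set_option maxRecDepth 8000


-- B replaces A's stateful line-by-line scan by whole-string pattern matching (one regex
-- substitution whose matches are the comment blocks); same return value, different structure
-- (objective: idiomatic/alternative; not claimed faster).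

-- ===== PORT A =====
-- A's for-loop with its (in_block, result) state, as structural recursion emitting lines in order.
def pvLoopA : List String → Bool → List String
  | [], _ => []
  | line :: rest, in_block =>
    if PySem.Str.startswith line "# At tree_index=" then
      ("    " ++ line) :: pvLoopA rest true
    else if in_block && PySem.Str.startswith line "#" then
      ("    " ++ line) :: pvLoopA rest true
    else
      line :: pvLoopA rest false

def indent_dedispersion_plan_comments (yaml_str : String) : String :=
  PySem.Str.join "\n" (pvLoopA ((PySem.Str.split? yaml_str "\n").getD []) false)

-- ===== PORT B =====
-- B is `_BLOCK_RE.sub(indent_block, yaml_str)` with the MULTILINE pattern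
-- r'^# At tree_index=.*(?:\n#.*)*'.  PySem has no regex engine, so the matching of this
-- fixed pattern is ported by hand, exactly: a match can only begin at a line start
-- ('^' with re.MULTILINE), it consumes the rest of the marker line ('.*' stops before
-- '\n') and then greedily every following '\n'-plus-line-starting-with-'#'
-- ((?:\n#.*)*); re.sub scans left to right, emitting unmatched text verbatim and each
-- match through the replacement function.

-- Does the text begin with '#' (i.e. '\n#' continuation test of the pattern)?
def pvStartsHash : List Char → Bool
  | c :: _ => c == '#'
  | [] => false

-- Greedy extent of one match, given text positioned at the match start:
-- returns (matched text, remaining text).  '.*' = everything up to '\n';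
-- the block continues past a '\n' only if '#' follows.
def pvMatchBlock : List Char → List Char × List Char
  | [] => ([], [])
  | c :: rest =>
    if c = '\n' then
      if pvStartsHash rest then
        ('\n' :: (pvMatchBlock rest).1, (pvMatchBlock rest).2)
      else ([], c :: rest)
    else
      (c :: (pvMatchBlock rest).1, (pvMatchBlock rest).2)

theorem pvMatchBlock_snd_le : ∀ s : List Char, (pvMatchBlock s).2.length ≤ s.length
  | [] => Nat.le_refl _
  | c :: rest => by
    simp only [pvMatchBlock]
    split
    · split
      · exact Nat.le_trans (pvMatchBlock_snd_le rest) (Nat.le_succ _)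
      · exact Nat.le_refl _
    · exact Nat.le_trans (pvMatchBlock_snd_le rest) (Nat.le_succ _)

-- re.sub's scan, at a line start: if the pattern matches here, emit the replacement
-- (Source B indents every line of the match via split('\n')/join) and resume after the
-- match; otherwise emit the current line verbatim and resume after its '\n'.
def pvScan (s : List Char) : List Char :=
  if ("# At tree_index=".toList).isPrefixOf s then
    PySem.Chars.join ['\n']
        ((PySem.Chars.splitOn (pvMatchBlock s).1 ['\n']).map (fun l => "    ".toList ++ l)) ++
      (match h : (pvMatchBlock s).2 with
       | '\n' :: r => '\n' :: pvScan r
       | _ => (pvMatchBlock s).2)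
  else
    match h : s.dropWhile (· ≠ '\n') with
    | '\n' :: r => s.takeWhile (· ≠ '\n') ++ '\n' :: pvScan r
    | _ => s.takeWhile (· ≠ '\n')
termination_by s.length
decreasing_by
  · have h1 := pvMatchBlock_snd_le s
    rw [h] at h1
    simp at h1
    omega
  · have h1 := s.length_dropWhile_le (p := (· ≠ '\n'))
    rw [h] at h1
    simp at h1
    omega

def indent_dedispersion_plan_comments_alt (yaml_str : String) : String :=
  String.ofList (pvScan yaml_str.toList)

-- ===== PRECONDITION & SPEC =====
def Spec_indent_dedispersion_plan_comments (yaml_str : String) (out : String) : Prop := out = indent_dedispersion_plan_comments_alt yaml_str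
instance (yaml_str : String) (out : String) : Decidable (Spec_indent_dedispersion_plan_comments yaml_str out) := by unfold Spec_indent_dedispersion_plan_comments; infer_instance

-- ===== CLAIM (what is proved, stated in full; the proofs are below) =====
def Claim_equal_indent_dedispersion_plan_comments : Prop := ∀ (yaml_str : String), Dom_indent_dedispersion_plan_comments yaml_str → Spec_indent_dedispersion_plan_comments yaml_str (indent_dedispersion_plan_comments yaml_str)

-- ===== LEMMAS AND PROOFS =====

-- str.split('\n') as plain structural recursion (proof vehicle for Chars.splitOn).
def pvLines : List Char → List (List Char)
  | [] => [[]]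
  | c :: rest =>
    if c = '\n' then [] :: pvLines rest
    else
      match pvLines rest with
      | p :: ps => (c :: p) :: ps
      | [] => [[c]]

theorem pvLines_ne_nil : ∀ s : List Char, pvLines s ≠ []
  | [] => by simp [pvLines]
  | c :: rest => by
    simp only [pvLines]
    split
    · simp
    · split <;> simp

theorem pvGo_eq : ∀ (s : List Char) (fuel : Nat) (cur : List Char) (acc : List (List Char)),
    s.length ≤ fuel →
    PySem.Chars.splitOn.go ['\n'] fuel s cur acc
      = acc.reverse ++
        (match pvLines s with
         | p :: ps => (cur.reverse ++ p) :: ps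
         | [] => []) := by
  intro s
  induction s with
  | nil =>
    intro fuel cur acc _
    cases fuel <;> simp [PySem.Chars.splitOn.go, pvLines]
  | cons c rest ih =>
    intro fuel cur acc hle
    cases fuel with
    | zero => simp at hle
    | succ f =>
      simp only [List.length_cons, Nat.succ_le_succ_iff] at hle
      by_cases hc : c = '\n'
      · subst hc
        have hpre : List.isPrefixOf ['\n'] ('\n' :: rest) = true := by
          simp [List.isPrefixOf]
        simp only [PySem.Chars.splitOn.go, hpre, if_true, List.length_singleton,
          List.drop_succ_cons, List.drop_zero]
        rw [ih f [] (cur.reverse :: acc) hle]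
        rcases hp : pvLines rest with _ | ⟨p, ps⟩
        · exact absurd hp (pvLines_ne_nil rest)
        · simp [pvLines, hp]
      · have hpre : List.isPrefixOf ['\n'] (c :: rest) = false := by
          simp [List.isPrefixOf]
          exact fun h => hc h.symm
        simp only [PySem.Chars.splitOn.go, hpre, Bool.false_eq_true, if_false]
        rw [ih f (c :: cur) acc hle]
        rcases hp : pvLines rest with _ | ⟨p, ps⟩
        · exact absurd hp (pvLines_ne_nil rest)
        · simp [pvLines, hp, hc]

theorem pvSplitOn_eq (s : List Char) : PySem.Chars.splitOn s ['\n'] = pvLines s := by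
  rw [PySem.Chars.splitOn, pvGo_eq s (s.length + 1) [] [] (Nat.le_succ _)]
  rcases hp : pvLines s with _ | ⟨p, ps⟩
  · exact absurd hp (pvLines_ne_nil s)
  · simp

-- A's loop at the List-Char level.
def pvLineLoop : List (List Char) → Bool → List (List Char)
  | [], _ => []
  | l :: rest, in_block =>
    if PySem.Chars.startswith l ("# At tree_index=".toList) then
      ("    ".toList ++ l) :: pvLineLoop rest true
    else if in_block && PySem.Chars.startswith l ['#'] then
      ("    ".toList ++ l) :: pvLineLoop rest true
    else
      l :: pvLineLoop rest false

theorem pvLoopA_map : ∀ (ls : List (List Char)) (b : Bool),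
    pvLoopA (ls.map String.ofList) b = (pvLineLoop ls b).map String.ofList := by
  intro ls
  induction ls with
  | nil => intro b; simp [pvLoopA, pvLineLoop]
  | cons l rest ih =>
    intro b
    have h1 : PySem.Str.startswith (String.ofList l) "# At tree_index="
        = PySem.Chars.startswith l ("# At tree_index=".toList) := by
      rw [PySem.Str.startswith_eq]; simp
    have h2 : PySem.Str.startswith (String.ofList l) "#"
        = PySem.Chars.startswith l ['#'] := by
      rw [PySem.Str.startswith_eq]
      simp only [String.toList_ofList]
      rfl
    have h3 : "    " ++ String.ofList l = String.ofList ("    ".toList ++ l) := by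
      apply String.toList_inj.mp
      simp
    simp only [List.map_cons, pvLoopA, pvLineLoop, h1, h2, h3, ih]
    split
    · simp
    · split <;> simp

theorem pvLineLoop_ne_nil (ls : List (List Char)) (b : Bool) (h : ls ≠ []) :
    pvLineLoop ls b ≠ [] := by
  cases ls with
  | nil => exact absurd rfl h
  | cons l rest =>
    simp only [pvLineLoop]
    split
    · simp
    · split <;> simp

-- the separator-append law for '\n'.join
theorem pvJoin_append (xs ys : List (List Char)) (hx : xs ≠ []) (hy : ys ≠ []) :
    PySem.Chars.join ['\n'] (xs ++ ys)
      = PySem.Chars.join ['\n'] xs ++ '\n' :: PySem.Chars.join ['\n'] ys := by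
  induction xs with
  | nil => exact absurd rfl hx
  | cons x xs ih =>
    cases xs with
    | nil =>
      cases ys with
      | nil => exact absurd rfl hy
      | cons y ys => simp [PySem.Chars.join_cons_cons, PySem.Chars.join_singleton]
    | cons x' xs' =>
      have := ih (by simp)
      simp only [List.cons_append] at this ⊢
      rw [PySem.Chars.join_cons_cons, PySem.Chars.join_cons_cons, this]
      simp

-- a prefix with no -- a prefix with no '\n' is a prefix of the string iff it is a prefix of the first line
theorem pvPrefix_takeLine : ∀ (p s : List Char), (∀ c ∈ p, c ≠ '\n') →
    p.isPrefixOf s = p.isPrefixOf (s.takeWhile (· ≠ '\n')) := by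
  intro p
  induction p with
  | nil => intro s _; simp [List.isPrefixOf]
  | cons a p ih =>
    intro s hnl
    have ha : (a == '\n') = false := by
      simp only [beq_eq_false_iff_ne, ne_eq]
      exact hnl a (List.mem_cons_self ..)
    cases s with
    | nil => simp [List.takeWhile]
    | cons b s =>
      by_cases hb : b = '\n'
      · subst hb
        have ht : List.takeWhile (· ≠ '\n') ('\n' :: s) = [] := by
          simp [List.takeWhile_cons]
        rw [ht]
        simp [List.isPrefixOf, ha]
      · have ht : List.takeWhile (· ≠ '\n') (b :: s) = b :: List.takeWhile (· ≠ '\n') s := by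
          simp [List.takeWhile_cons, hb]
        rw [ht]
        show (a == b && p.isPrefixOf s) = (a == b && p.isPrefixOf (List.takeWhile (· ≠ '\n') s))
        rw [ih s (fun c hc => hnl c (List.mem_cons_of_mem a hc))]

theorem pvMarker_eq :
    "# At tree_index=".toList
      = ['#', ' ', 'A', 't', ' ', 't', 'r', 'e', 'e', '_', 'i', 'n', 'd', 'e', 'x', '='] := by
  decide

theorem pvMarker_no_nl : ∀ c ∈ "# At tree_index=".toList, c ≠ '\n' := by
  rw [pvMarker_eq]
  intro c hc
  fin_cases hc <;> decide

-- decomposition of pvLines into first line and the rest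
theorem pvLines_decomp : ∀ s : List Char,
    pvLines s = (s.takeWhile (· ≠ '\n')) ::
      (match s.dropWhile (· ≠ '\n') with
       | _ :: r => pvLines r
       | [] => []) := by
  intro s
  induction s with
  | nil => simp [pvLines]
  | cons c rest ih =>
    by_cases hc : c = '\n'
    · subst hc; simp [pvLines, List.takeWhile, List.dropWhile]
    · have ht : List.takeWhile (· ≠ '\n') (c :: rest) = c :: List.takeWhile (· ≠ '\n') rest := by
        simp [List.takeWhile_cons, hc]
      have hd : List.dropWhile (· ≠ '\n') (c :: rest) = List.dropWhile (· ≠ '\n') rest := by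
        simp [List.dropWhile_cons, hc]
      rw [ht, hd]
      simp only [pvLines, hc, if_false]
      rw [ih]

-- shape of dropWhile (· ≠ '\n')
theorem pvDrop_shape (s : List Char) :
    s.dropWhile (· ≠ '\n') = [] ∨ ∃ r, s.dropWhile (· ≠ '\n') = '\n' :: r := by
  induction s with
  | nil => left; rfl
  | cons c rest ih =>
    by_cases hc : c = '\n'
    · subst hc; right; exact ⟨rest, by simp [List.dropWhile]⟩
    · simpa [List.dropWhile, hc] using ih

-- startswith '#' is pvStartsHash
theorem pvStartswith_hash (l : List Char) :
    PySem.Chars.startswith l ['#'] = pvStartsHash l := by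
  cases l with
  | nil => rfl
  | cons c rest =>
    simp only [pvStartsHash, PySem.Chars.startswith, List.isPrefixOf, Bool.and_true]
    exact BEq.comm ..

theorem pvMarker_hash (l : List Char)
    (h : PySem.Chars.startswith l ("# At tree_index=".toList) = true) :
    pvStartsHash l = true := by
  rw [← pvStartswith_hash]
  simp only [PySem.Chars.startswith] at *
  rw [List.isPrefixOf_iff_prefix] at *
  exact List.IsPrefix.trans (by decide) h

theorem pvHash_takeLine (r : List Char) :
    pvStartsHash (r.takeWhile (· ≠ '\n')) = pvStartsHash r := by
  cases r with
  | nil => rfl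
  | cons c rest =>
    by_cases hc : c = '\n'
    · subst hc
      have ht : List.takeWhile (· ≠ '\n') ('\n' :: rest) = [] := by
        simp [List.takeWhile_cons]
      rw [ht]
      simp [pvStartsHash]
    · have ht : List.takeWhile (· ≠ '\n') (c :: rest) = c :: List.takeWhile (· ≠ '\n') rest := by
        simp [List.takeWhile_cons, hc]
      rw [ht]
      rfl

-- the loop over a run of '#' lines, starting in a block
theorem pvLineLoop_true_hash : ∀ (ls rest : List (List Char)),
    (∀ l ∈ ls, pvStartsHash l = true) →
    pvLineLoop (ls ++ rest) true = ls.map ("    ".toList ++ ·) ++ pvLineLoop rest true := by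
  intro ls
  induction ls with
  | nil => intro rest _; simp
  | cons l ls ih =>
    intro rest hall
    have hl : PySem.Chars.startswith l ['#'] = true := by
      rw [pvStartswith_hash]; exact hall l (List.mem_cons_self ..)
    simp only [List.cons_append, pvLineLoop, hl, Bool.and_true, List.map_cons]
    rw [ih rest (fun x hx => hall x (List.mem_cons_of_mem l hx))]
    split
    · simp
    · simp

-- entering/leaving a block makes no difference when the next line is not a comment
theorem pvLineLoop_true_eq_false (ls : List (List Char))
    (h : ∀ l ∈ ls.head?, pvStartsHash l = false) :
    pvLineLoop ls true = pvLineLoop ls false := by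
  cases ls with
  | nil => rfl
  | cons l rest =>
    have hl : pvStartsHash l = false := h l rfl
    have hm : PySem.Chars.startswith l ("# At tree_index=".toList) = false := by
      cases hm : PySem.Chars.startswith l ("# At tree_index=".toList) with
      | false => rfl
      | true => rw [pvMarker_hash l hm] at hl; cases hl
    simp [pvLineLoop, hm, pvStartswith_hash, hl]

-- the remainder after a match is empty or starts at a newline
theorem pvMatchBlock_snd_shape : ∀ s : List Char,
    (pvMatchBlock s).2 = [] ∨ ∃ r, (pvMatchBlock s).2 = '\n' :: r := by
  intro s
  fun_induction pvMatchBlock s with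
  | case1 => left; rfl
  | case2 rest hh ih => exact ih
  | case3 rest hh => right; exact ⟨rest, rfl⟩
  | case4 c rest hc ih => exact ih

-- structure of one regex match: its lines are the first line of s followed by a run
-- of '#' lines, and the rest of the text (if nonempty) is '\n' + a non-'#' line
theorem pvMatchBlock_spec : ∀ s : List Char,
    (match (pvMatchBlock s).2 with
     | '\n' :: r => pvLines s = pvLines (pvMatchBlock s).1 ++ pvLines r ∧ pvStartsHash r = false
     | _ => (pvMatchBlock s).2 = [] ∧ pvLines s = pvLines (pvMatchBlock s).1) ∧
    (∀ l ∈ (pvLines (pvMatchBlock s).1).tail, pvStartsHash l = true) ∧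
    (pvLines (pvMatchBlock s).1).head? = some (s.takeWhile (· ≠ '\n')) := by
  intro s
  fun_induction pvMatchBlock s with
  | case1 =>
    exact ⟨⟨rfl, rfl⟩, by simp [pvLines], by simp [pvLines]⟩
  | case2 rest hh ih =>
    obtain ⟨ih1, ih2, ih3⟩ := ih
    rcases hp : pvLines (pvMatchBlock rest).1 with _ | ⟨p0, ps⟩
    · exact absurd hp (pvLines_ne_nil _)
    have hlines : pvLines ('\n' :: (pvMatchBlock rest).1) = [] :: p0 :: ps := by
      simp [pvLines, hp]
    have hp0 : p0 = rest.takeWhile (· ≠ '\n') := by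
      rw [hp] at ih3; simpa using ih3
    have hp0hash : pvStartsHash p0 = true := by
      rw [hp0, pvHash_takeLine]; exact hh
    refine ⟨?_, ?_, ?_⟩
    · simp only
      rcases pvMatchBlock_snd_shape rest with hsh | ⟨r', hsh⟩
      · rw [hsh] at ih1 ⊢
        simp only at ih1 ⊢
        exact ⟨trivial, by simp [pvLines, ih1.2]⟩
      · rw [hsh] at ih1 ⊢
        simp only at ih1 ⊢
        refine ⟨?_, ih1.2⟩
        rw [hlines]
        simp [pvLines, ih1.1, hp]
    · simp only
      rw [hlines]
      intro l hl
      simp only [List.tail_cons] at hl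
      rcases List.mem_cons.mp hl with hl1 | hl1
      · subst hl1; exact hp0hash
      · exact ih2 l (by rw [hp]; simpa using hl1)
    · simp only
      rw [hlines]; simp [List.takeWhile_cons]
  | case3 rest hh =>
    rw [Bool.not_eq_true] at hh
    refine ⟨?_, by simp [pvLines], by simp [pvLines, List.takeWhile_cons]⟩
    simp only
    exact ⟨by simp [pvLines], hh⟩
  | case4 c rest hc ih =>
    obtain ⟨ih1, ih2, ih3⟩ := ih
    rcases hp : pvLines (pvMatchBlock rest).1 with _ | ⟨p0, ps⟩
    · exact absurd hp (pvLines_ne_nil _)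
    have hlines : pvLines (c :: (pvMatchBlock rest).1) = (c :: p0) :: ps := by
      simp [pvLines, hp, hc]
    have hp0 : p0 = rest.takeWhile (· ≠ '\n') := by
      rw [hp] at ih3; simpa using ih3
    rcases hr : pvLines rest with _ | ⟨r0, rs⟩
    · exact absurd hr (pvLines_ne_nil _)
    have hrest : pvLines (c :: rest) = (c :: r0) :: rs := by
      simp [pvLines, hr, hc]
    refine ⟨?_, ?_, ?_⟩
    · simp only
      rcases pvMatchBlock_snd_shape rest with hsh | ⟨r', hsh⟩
      · rw [hsh] at ih1 ⊢
        simp only at ih1 ⊢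
        refine ⟨trivial, ?_⟩
        rw [hrest, hlines]
        rw [hr, hp] at ih1
        obtain ⟨h1, h2⟩ := List.cons.inj ih1.2
        rw [h1, h2]
      · rw [hsh] at ih1 ⊢
        simp only at ih1 ⊢
        refine ⟨?_, ih1.2⟩
        rw [hrest, hlines]
        rw [hr, hp] at ih1
        simp only [List.cons_append] at ih1
        obtain ⟨h1, h2⟩ := List.cons.inj ih1.1
        rw [h1, h2]
        simp
    · simp only
      rw [hlines]
      intro l hl
      exact ih2 l (by rw [hp]; simpa using hl)
    · simp only
      rw [hlines]
      simp only [List.head?_cons, Option.some.injEq]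
      have ht : List.takeWhile (· ≠ '\n') (c :: rest) = c :: List.takeWhile (· ≠ '\n') rest := by
        simp [List.takeWhile_cons, hc]
      rw [ht, hp0]

-- main equivalence at the char level
theorem pvLineLoop_cons_marker (l : List Char) (ls : List (List Char)) (b : Bool)
    (h : PySem.Chars.startswith l ("# At tree_index=".toList) = true) :
    pvLineLoop (l :: ls) b = ("    ".toList ++ l) :: pvLineLoop ls true := by
  simp only [pvLineLoop, h, if_true]

theorem pvLineLoop_cons_plain (l : List Char) (ls : List (List Char))
    (h : PySem.Chars.startswith l ("# At tree_index=".toList) = false) :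
    pvLineLoop (l :: ls) false = l :: pvLineLoop ls false := by
  simp only [pvLineLoop, h, Bool.false_eq_true, if_false, Bool.false_and]

theorem pvScan_eq (s : List Char) :
    pvScan s = PySem.Chars.join ['\n'] (pvLineLoop (pvLines s) false) := by
  fun_induction pvScan s with
  | case1 s hm ih =>
    obtain ⟨sp1, sp2, sp3⟩ := pvMatchBlock_spec s
    rcases hp : pvLines (pvMatchBlock s).1 with _ | ⟨l0, t⟩
    · exact absurd hp (pvLines_ne_nil _)
    have hl0 : l0 = s.takeWhile (· ≠ '\n') := by
      rw [hp] at sp3; simpa using sp3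
    have ht : ∀ l ∈ t, pvStartsHash l = true := by
      intro l hl
      exact sp2 l (by rw [hp]; simpa using hl)
    have hsw : PySem.Chars.startswith l0 ("# At tree_index=".toList) = true := by
      simp only [PySem.Chars.startswith]
      rw [hl0, ← pvPrefix_takeLine _ _ pvMarker_no_nl]
      exact hm
    rcases pvMatchBlock_snd_shape s with hsh | ⟨r, hsh⟩
    · rw [hsh] at sp1 ⊢
      simp only at sp1 ⊢
      rw [pvSplitOn_eq, hp, sp1.2, hp, pvLineLoop_cons_marker l0 t false hsw]
      have h2 := pvLineLoop_true_hash t [] ht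
      rw [List.append_nil] at h2
      rw [h2]
      have h3 : pvLineLoop [] true = [] := rfl
      rw [h3, List.append_nil, List.map_cons, List.append_nil]
    · rw [hsh] at sp1 ⊢
      simp only at sp1 ⊢
      obtain ⟨hsplit, hrhash⟩ := sp1
      rw [pvSplitOn_eq, hp, hsplit, hp, ih r hsh]
      rw [List.cons_append, pvLineLoop_cons_marker l0 _ false hsw,
        pvLineLoop_true_hash t _ ht]
      have hhead : ∀ l ∈ (pvLines r).head?, pvStartsHash l = false := by
        rw [pvLines_decomp r]
        intro l hl
        simp only [List.head?_cons, Option.mem_def, Option.some.injEq] at hl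
        rw [← hl, pvHash_takeLine]
        exact hrhash
      rw [pvLineLoop_true_eq_false _ hhead]
      have hjoin := pvJoin_append (("    ".toList ++ l0) :: t.map ("    ".toList ++ ·))
        (pvLineLoop (pvLines r) false) (by simp)
        (pvLineLoop_ne_nil _ _ (pvLines_ne_nil r))
      simp only [List.cons_append] at hjoin ⊢
      rw [hjoin]
      simp
  | case2 s hm r hd ih =>
    rw [Bool.not_eq_true] at hm
    rw [ih]
    have hdec := pvLines_decomp s
    rw [hd] at hdec
    simp only at hdec
    rw [hdec]
    have hml0 : PySem.Chars.startswith (s.takeWhile (· ≠ '\n')) ("# At tree_index=".toList) = false := by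
      simp only [PySem.Chars.startswith]
      rw [← pvPrefix_takeLine _ _ pvMarker_no_nl]
      exact hm
    rw [pvLineLoop_cons_plain _ _ hml0]
    rcases hy : pvLineLoop (pvLines r) false with _ | ⟨y, ys⟩
    · exact absurd hy (pvLineLoop_ne_nil _ _ (pvLines_ne_nil r))
    · rw [PySem.Chars.join_cons_cons]
      simp
  | case3 s hm hno =>
    rw [Bool.not_eq_true] at hm
    have hd : s.dropWhile (· ≠ '\n') = [] := by
      rcases pvDrop_shape s with hd | ⟨r, hd⟩
      · exact hd
      · exact absurd hd (by intro h; exact hno r h)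
    have hdec := pvLines_decomp s
    rw [hd] at hdec
    simp only at hdec
    rw [hdec]
    have hml0 : PySem.Chars.startswith (s.takeWhile (· ≠ '\n')) ("# At tree_index=".toList) = false := by
      simp only [PySem.Chars.startswith]
      rw [← pvPrefix_takeLine _ _ pvMarker_no_nl]
      exact hm
    rw [pvLineLoop_cons_plain _ _ hml0]
    have h3 : pvLineLoop [] false = [] := rfl
    rw [h3, PySem.Chars.join_singleton]

-- ===== VERDICT (by name: the statement is the Claim_ definition above) =====
theorem indent_dedispersion_plan_comments_spec : Claim_equal_indent_dedispersion_plan_comments := by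
  intro yaml_str _
  unfold Spec_indent_dedispersion_plan_comments
  unfold indent_dedispersion_plan_comments indent_dedispersion_plan_comments_alt
  have hnl : "\n".toList = ['\n'] := by decide
  have hsplit : (PySem.Str.split? yaml_str "\n").getD []
      = (pvLines yaml_str.toList).map String.ofList := by
    simp only [PySem.Str.split?, PySem.Chars.split?, hnl]
    simp [pvSplitOn_eq]
  rw [hsplit, pvLoopA_map]
  apply String.toList_inj.mp
  simp only [PySem.Str.toList_join, hnl, List.map_map]
  rw [pvScan_eq]
  rw [show (String.toList ∘ String.ofList) = (fun l : List Char => l) by funext l; simp,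
    List.map_id_fun']
  simp
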